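-- pv_equiv track=rewrite | github.com/burning-calamity/extirpation | online/route_boustrophedon.py | route_boustrophedon_encrypt
-- ===== SOURCE A (Python) =====
-- def route_boustrophedon_encrypt(plaintext: str, columns: int = 5) -> str:
--     """Write row-wise zigzag and read column-wise."""
--     if columns < 1:
--         raise ValueError('columns must be >= 1')
--
--     rows = (len(plaintext) + columns - 1) // columns
--     grid = [['' for _ in range(columns)] for _ in range(rows)]
--
--     idx = 0
--     for r in range(rows):
--         cols = range(columns) if r % 2 == 0 else range(columns - 1, -1, -1)
--         for c in cols:
--             if idx < len(plaintext):
--                 grid[r][c] = plaintext[idx]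
--                 idx += 1
--
--     out: list[str] = []
--     for c in range(columns):
--         for r in range(rows):
--             if grid[r][c]:
--                 out.append(grid[r][c])
--     return ''.join(out)
-- ===== SOURCE B (Python) =====
-- def route_boustrophedon_encrypt(plaintext: str, columns: int = 5) -> str:
--     """Boustrophedon route cipher read off by direct index arithmetic, no grid built."""
--     if columns < 1:
--         raise ValueError('columns must be >= 1')
--     n = len(plaintext)
--     rows = (n + columns - 1) // columns
--     out = []
--     for c in range(columns):
--         for r in range(rows):
--             idx = r * columns + (c if r % 2 == 0 else columns - 1 - c)
--             if idx < n:
--                 out.append(plaintext[idx])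
--     return ''.join(out)
-- ===== Notes on version B (the rewrite author's own statement) =====
-- stated objective: simpler
-- what changed: B never builds the 2D grid: it computes each output character's plaintext index directly as r*columns + (c if r even else columns-1-c) in a single column-major double loop, replacing A's fill-grid-then-read-grid two-phase algorithm.
import Mathlib
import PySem

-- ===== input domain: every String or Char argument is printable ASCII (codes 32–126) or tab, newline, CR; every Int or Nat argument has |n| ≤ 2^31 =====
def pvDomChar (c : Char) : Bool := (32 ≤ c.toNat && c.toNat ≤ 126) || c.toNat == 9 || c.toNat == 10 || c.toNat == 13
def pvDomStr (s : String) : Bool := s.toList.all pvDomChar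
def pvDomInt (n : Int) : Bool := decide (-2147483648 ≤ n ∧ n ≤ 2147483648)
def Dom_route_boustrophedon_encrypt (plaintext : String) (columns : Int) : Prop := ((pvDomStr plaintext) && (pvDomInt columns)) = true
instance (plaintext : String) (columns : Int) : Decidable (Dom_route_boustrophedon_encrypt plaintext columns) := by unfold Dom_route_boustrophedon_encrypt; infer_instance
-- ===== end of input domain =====

-- B replaces A's build-a-grid-then-read-it-column-wise scheme by direct index arithmetic (objective: simpler).

-- ===== PORT A =====
-- Grid cells are `Option Char`: `none` is Python's '' placeholder, `some ch` a written one-char string.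
def route_boustrophedon_encrypt (plaintext : String) (columns : Int) : String :=
  if columns < 1 then "" -- Python raises ValueError here; excluded by Pre_
  else
    let n : Int := PySem.Str.len plaintext
    let rows : Int := PySem.Int.floordiv (n + columns - 1) columns
    let grid0 : List (List (Option Char)) :=
      (PySem.List.pyRange 0 rows 1).map (fun _ => (PySem.List.pyRange 0 columns 1).map (fun _ => (none : Option Char)))
    let fill : List (List (Option Char)) × Int :=
      (PySem.List.pyRange 0 rows 1).foldl (fun st r =>
        let cs := if PySem.Int.mod r 2 == 0 then PySem.List.pyRange 0 columns 1
                  else PySem.List.pyRange (columns - 1) (-1) (-1)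
        cs.foldl (fun st c =>
          if st.2 < n then
            (st.1.set r.toNat ((st.1.getD r.toNat []).set c.toNat (PySem.Str.pyGet? plaintext st.2)), st.2 + 1)
          else st) st) (grid0, 0)
    let grid := fill.1
    let out : List Char :=
      (PySem.List.pyRange 0 columns 1).foldl (fun acc c =>
        (PySem.List.pyRange 0 rows 1).foldl (fun acc r =>
          match (grid.getD r.toNat []).getD c.toNat none with
          | some ch => acc ++ [ch]
          | none => acc) acc) []
    String.ofList out

-- ===== PORT B =====
def route_boustrophedon_encrypt_alt (plaintext : String) (columns : Int) : String :=
  if columns < 1 then "" -- B raises ValueError here too; excluded by Pre_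
  else
    let n : Int := PySem.Str.len plaintext
    let rows : Int := PySem.Int.floordiv (n + columns - 1) columns
    let out : List Char :=
      (PySem.List.pyRange 0 columns 1).foldl (fun acc c =>
        (PySem.List.pyRange 0 rows 1).foldl (fun acc r =>
          let idx := r * columns + (if PySem.Int.mod r 2 == 0 then c else columns - 1 - c)
          if idx < n then
            match PySem.Str.pyGet? plaintext idx with
            | some ch => acc ++ [ch]
            | none => acc
          else acc) acc) []
    String.ofList out

-- ===== PRECONDITION & SPEC =====
-- Both A and B raise ValueError for columns < 1; Pre_ keeps exactly the inputs where A returns.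
def Pre_route_boustrophedon_encrypt (plaintext : String) (columns : Int) : Prop := 1 ≤ columns
instance (plaintext : String) (columns : Int) : Decidable (Pre_route_boustrophedon_encrypt plaintext columns) := by unfold Pre_route_boustrophedon_encrypt; infer_instance
def pvWitness_route_boustrophedon_encrypt : String × Int := ("HELLO WORLD", 3)

def Spec_route_boustrophedon_encrypt (plaintext : String) (columns : Int) (out : String) : Prop := out = route_boustrophedon_encrypt_alt plaintext columns
instance (plaintext : String) (columns : Int) (out : String) : Decidable (Spec_route_boustrophedon_encrypt plaintext columns out) := by unfold Spec_route_boustrophedon_encrypt; infer_instance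

-- ===== CLAIM (what is proved, stated in full; the proofs are below) =====
def Claim_equal_route_boustrophedon_encrypt : Prop := ∀ (plaintext : String) (columns : Int), Dom_route_boustrophedon_encrypt plaintext columns → Pre_route_boustrophedon_encrypt plaintext columns → Spec_route_boustrophedon_encrypt plaintext columns (route_boustrophedon_encrypt plaintext columns)

-- ===== LEMMAS AND PROOFS =====

-- The boustrophedon reading position of grid cell (r, c), and the final cell contents.
def bousPos (cols r c : Int) : Int :=
  r * cols + (if PySem.Int.mod r 2 == 0 then c else cols - 1 - c)

def bousCell (s : List Char) (cols r c : Int) : Option Char := s[(bousPos cols r c).toNat]?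

def bousRow (s : List Char) (cols : Int) (r : Int) : List (Option Char) :=
  (List.range cols.toNat).map (fun cn : Nat => bousCell s cols r (cn : Int))

def bousGrid (s : List Char) (cols : Int) (rowsN k : Nat) : List (List (Option Char)) :=
  (List.range rowsN).map (fun rn => if rn < k then bousRow s cols (rn : Int) else List.replicate cols.toNat none)

lemma bousRow_length (s : List Char) (cols r : Int) : (bousRow s cols r).length = cols.toNat := by
  simp [bousRow]

lemma bousGrid_length (s : List Char) (cols : Int) (rowsN k : Nat) :
    (bousGrid s cols rowsN k).length = rowsN := by simp [bousGrid]

lemma bousGrid_getD (s : List Char) (cols : Int) (rowsN k r : Nat) (hr : r < rowsN) :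
    (bousGrid s cols rowsN k).getD r [] =
      (if r < k then bousRow s cols (r : Int) else List.replicate cols.toNat none) := by
  simp [bousGrid, List.getD, hr]

lemma bousGrid_set (s : List Char) (cols : Int) (rowsN k : Nat) (hk : k < rowsN) :
    (bousGrid s cols rowsN k).set k (bousRow s cols (k : Int)) = bousGrid s cols rowsN (k + 1) := by
  apply List.ext_getElem
  · simp [bousGrid]
  intro i hi hi'
  simp only [bousGrid, List.length_map, List.length_range] at hi hi' ⊢
  rcases eq_or_ne i k with rfl | hne
  · rw [List.getElem_set_self (by simp; omega)]
    simp
  · rw [List.getElem_set_ne (by omega)]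
    simp only [List.getElem_map, List.getElem_range]
    have : i < k ↔ i < k + 1 := by omega
    simp [this]


lemma bousRow_getElem? (s : List Char) (cols r : Int) (c : Nat) (hc : c < cols.toNat) :
    (bousRow s cols r)[c]? = some (bousCell s cols r (c : Int)) := by
  rw [bousRow, List.getElem?_map (f := fun cn : Nat => bousCell s cols r (cn : Int)),
    List.getElem?_range hc, Option.map_some]

lemma bousRow_getElem (s : List Char) (cols r : Int) (c : Nat) (hc : c < cols.toNat) :
    (bousRow s cols r)[c]'(by simpa [bousRow_length] using hc) = bousCell s cols r (c : Int) := by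
  have h := bousRow_getElem? s cols r c hc
  rwa [List.getElem?_eq_getElem (by simpa [bousRow_length] using hc), Option.some_inj] at h

lemma take_replicate_set {α : Type} (l : List α) (c m : Nat) (d : α) (hc : c < l.length) :
    (l.take c ++ List.replicate (m + 1) d).set c (l[c]'hc) = l.take (c + 1) ++ List.replicate m d := by
  have hlen : (l.take c).length = c := by simp; omega
  rw [List.set_append_right _ _ (by omega), hlen, Nat.sub_self, List.replicate_succ,
    List.set_cons_zero, List.take_succ_eq_append_getElem hc, List.append_assoc,
    List.singleton_append]

lemma take_replicate_shift {α : Type} (l : List α) (c m : Nat) (d : α) (hc : c < l.length)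
    (hd : l[c]'hc = d) :
    l.take c ++ List.replicate (m + 1) d = l.take (c + 1) ++ List.replicate m d := by
  rw [List.replicate_succ, List.take_succ_eq_append_getElem hc, hd, List.append_assoc,
    List.singleton_append]

lemma replicate_drop_set {α : Type} (l : List α) (c : Nat) (d : α) (hc : c < l.length) :
    (List.replicate (c + 1) d ++ l.drop (c + 1)).set c (l[c]'hc) = List.replicate c d ++ l.drop c := by
  rw [List.replicate_succ', List.append_assoc, List.set_append_right _ _ (by simp),
    List.length_replicate, Nat.sub_self, List.singleton_append, List.set_cons_zero,
    ← List.drop_eq_getElem_cons hc]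

lemma replicate_drop_shift {α : Type} (l : List α) (c : Nat) (d : α) (hc : c < l.length)
    (hd : l[c]'hc = d) :
    List.replicate (c + 1) d ++ l.drop (c + 1) = List.replicate c d ++ l.drop c := by
  rw [List.replicate_succ', List.append_assoc, List.drop_eq_getElem_cons hc, hd,
    List.singleton_append]

-- The inner fill loop for an EVEN row, peeled column by column from the left.
lemma fill_even (plaintext : String) (cols r : Int) (hc : 1 ≤ cols) (hr : 0 ≤ r)
    (hpar : (PySem.Int.mod r 2 == 0) = true) :
    ∀ (m : Nat) (c : Int) (g : List (List (Option Char))) (idx : Int),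
    c = cols - m → 0 ≤ c →
    r.toNat < g.length →
    g.getD r.toNat [] = (bousRow plaintext.toList cols r).take c.toNat ++ List.replicate m none →
    idx = min (r * cols + c) ((plaintext.toList.length : Int)) →
    (PySem.List.pyRange c cols 1).foldl (fun st c =>
      if st.2 < ((plaintext.toList.length : Int)) then
        (st.1.set r.toNat ((st.1.getD r.toNat []).set c.toNat (PySem.Str.pyGet? plaintext st.2)), st.2 + 1)
      else st) (g, idx)
    = (g.set r.toNat (bousRow plaintext.toList cols r),
       min (r * cols + cols) ((plaintext.toList.length : Int))) := by
  intro m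
  induction m with
  | zero =>
    intro c g idx hce hc0 hlen hrow hidx
    have hcc : c = cols := by push_cast at hce; omega
    subst hcc
    rw [PySem.List.pyRange_one]
    simp only [sub_self, Int.toNat_zero, List.range_zero, List.map_nil, List.foldl_nil]
    have hrow' : g[r.toNat]'hlen = bousRow plaintext.toList c r := by
      rw [← List.getD_eq_getElem g [] hlen, hrow]
      simp [List.take_of_length_le (le_of_eq (bousRow_length _ _ _))]
    rw [Prod.mk.injEq]
    exact ⟨by rw [← hrow', List.set_getElem_self], by omega⟩
  | succ m ih =>
    intro c g idx hce hc0 hlen hrow hidx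
    have hclt : c < cols := by push_cast at hce; omega
    have hrc : 0 ≤ r * cols := mul_nonneg hr (by omega)
    have hn0 : (0 : Int) ≤ (plaintext.toList.length : Int) := by positivity
    have hcnat : (c.toNat : Int) = c := Int.toNat_of_nonneg hc0
    have hcltn : c.toNat < cols.toNat := by omega
    have hcbr : c.toNat < (bousRow plaintext.toList cols r).length := by
      simpa [bousRow_length] using hcltn
    have hposeq : bousPos cols r c = r * cols + c := by rw [bousPos, if_pos hpar]
    have hcell : (bousRow plaintext.toList cols r)[c.toNat]'hcbr
        = plaintext.toList[(r * cols + c).toNat]? := by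
      rw [show (bousRow plaintext.toList cols r)[c.toNat]'hcbr
            = bousCell plaintext.toList cols r ((c.toNat : Nat) : Int) from
          bousRow_getElem plaintext.toList cols r c.toNat hcltn]
      rw [hcnat, bousCell, hposeq]
    rw [PySem.List.pyRange_one_cons (by omega), List.foldl_cons]
    by_cases hlt : idx < (plaintext.toList.length : Int)
    · have hieq : idx = r * cols + c := by omega
      have hi0 : 0 ≤ idx := by omega
      have hv : PySem.Str.pyGet? plaintext idx = plaintext.toList[idx.toNat]? :=
        PySem.List.pyGet?_of_nonneg _ hi0
      rw [if_pos hlt]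
      have hglen' : r.toNat < (g.set r.toNat
          ((g.getD r.toNat []).set c.toNat (PySem.Str.pyGet? plaintext idx))).length := by
        simpa using hlen
      rw [ih (c + 1) _ (idx + 1) (by omega) (by omega) hglen' ?_ (by omega)]
      · rw [List.set_set]
      · rw [List.getD_eq_getElem _ [] hglen', List.getElem_set_self (by simpa using hlen), hrow, hv, hieq, ← hcell,
          take_replicate_set _ _ _ _ hcbr]
        congr 2
        omega
    · rw [if_neg hlt]
      have hge : (plaintext.toList.length : Int) ≤ r * cols + c := by omega
      have hnone : (bousRow plaintext.toList cols r)[c.toNat]'hcbr = none := by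
        rw [hcell, List.getElem?_eq_none]
        omega
      rw [ih (c + 1) g idx (by omega) (by omega) hlen ?_ (by omega)]
      rw [hrow, take_replicate_shift _ _ _ _ hcbr hnone]
      congr 2
      omega

-- The inner fill loop for an ODD row, peeled column by column from the right.
lemma fill_odd (plaintext : String) (cols r : Int) (hc : 1 ≤ cols) (hr : 0 ≤ r)
    (hpar : (PySem.Int.mod r 2 == 0) = false) :
    ∀ (m : Nat) (c : Int) (g : List (List (Option Char))) (idx : Int),
    (c : Int) = (m : Int) - 1 → c < cols →
    r.toNat < g.length →
    g.getD r.toNat [] = List.replicate m none ++ (bousRow plaintext.toList cols r).drop m →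
    idx = min (r * cols + (cols - 1 - c)) ((plaintext.toList.length : Int)) →
    (PySem.List.pyRange c (-1) (-1)).foldl (fun st c =>
      if st.2 < ((plaintext.toList.length : Int)) then
        (st.1.set r.toNat ((st.1.getD r.toNat []).set c.toNat (PySem.Str.pyGet? plaintext st.2)), st.2 + 1)
      else st) (g, idx)
    = (g.set r.toNat (bousRow plaintext.toList cols r),
       min (r * cols + cols) ((plaintext.toList.length : Int))) := by
  intro m
  induction m with
  | zero =>
    intro c g idx hce hclt hlen hrow hidx
    have hcc : c = -1 := by push_cast at hce; omega
    subst hcc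
    rw [PySem.List.pyRange_neg_one_eq_nil (by omega), List.foldl_nil]
    have hrow' : g[r.toNat]'hlen = bousRow plaintext.toList cols r := by
      rw [← List.getD_eq_getElem g [] hlen, hrow]
      simp
    rw [Prod.mk.injEq]
    exact ⟨by rw [← hrow', List.set_getElem_self], by omega⟩
  | succ m ih =>
    intro c g idx hce hclt hlen hrow hidx
    have hc0 : 0 ≤ c := by push_cast at hce; omega
    have hrc : 0 ≤ r * cols := mul_nonneg hr (by omega)
    have hn0 : (0 : Int) ≤ (plaintext.toList.length : Int) := by positivity
    have hcnat : (c.toNat : Int) = c := Int.toNat_of_nonneg hc0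
    have hm : c.toNat = m := by omega
    have hcltn : c.toNat < cols.toNat := by omega
    have hcbr : c.toNat < (bousRow plaintext.toList cols r).length := by
      simpa [bousRow_length] using hcltn
    have hposeq : bousPos cols r c = r * cols + (cols - 1 - c) := by
      rw [bousPos, if_neg (by rw [hpar]; simp)]
    have hcell : (bousRow plaintext.toList cols r)[c.toNat]'hcbr
        = plaintext.toList[(r * cols + (cols - 1 - c)).toNat]? := by
      rw [show (bousRow plaintext.toList cols r)[c.toNat]'hcbr
            = bousCell plaintext.toList cols r ((c.toNat : Nat) : Int) from
          bousRow_getElem plaintext.toList cols r c.toNat hcltn]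
      rw [hcnat, bousCell, hposeq]
    rw [PySem.List.pyRange_neg_one_cons (by omega), List.foldl_cons]
    by_cases hlt : idx < (plaintext.toList.length : Int)
    · have hieq : idx = r * cols + (cols - 1 - c) := by omega
      have hi0 : 0 ≤ idx := by omega
      have hv : PySem.Str.pyGet? plaintext idx = plaintext.toList[idx.toNat]? :=
        PySem.List.pyGet?_of_nonneg _ hi0
      rw [if_pos hlt]
      have hglen' : r.toNat < (g.set r.toNat
          ((g.getD r.toNat []).set c.toNat (PySem.Str.pyGet? plaintext idx))).length := by
        simpa using hlen
      rw [ih (c - 1) _ (idx + 1) (by omega) (by omega) hglen' ?_ (by omega)]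
      · rw [List.set_set]
      · rw [List.getD_eq_getElem _ [] hglen',
          List.getElem_set_self (by simpa using hlen), hrow, hv, hieq, ← hcell, ← hm,
          replicate_drop_set _ _ _ hcbr, hm]
    · rw [if_neg hlt]
      have hnone : (bousRow plaintext.toList cols r)[c.toNat]'hcbr = none := by
        rw [hcell, List.getElem?_eq_none]
        omega
      rw [ih (c - 1) g idx (by omega) (by omega) hlen ?_ (by omega)]
      rw [hrow, ← hm, replicate_drop_shift _ _ _ hcbr hnone, hm]

-- The whole fill loop turns the blank grid into the boustrophedon grid.
lemma fill_all (plaintext : String) (cols : Int) (rows : Int) (hc : 1 ≤ cols) (h0 : 0 ≤ rows) :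
    ∀ (m k : Nat), k + m = rows.toNat →
    (PySem.List.pyRange (k : Int) rows 1).foldl (fun st r =>
      (if PySem.Int.mod r 2 == 0 then PySem.List.pyRange 0 cols 1
       else PySem.List.pyRange (cols - 1) (-1) (-1)).foldl (fun st c =>
        if st.2 < ((plaintext.toList.length : Int)) then
          (st.1.set r.toNat ((st.1.getD r.toNat []).set c.toNat (PySem.Str.pyGet? plaintext st.2)), st.2 + 1)
        else st) st) (bousGrid plaintext.toList cols rows.toNat k, min ((k : Int) * cols) ((plaintext.toList.length : Int)))
    = (bousGrid plaintext.toList cols rows.toNat rows.toNat,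
       min ((rows.toNat : Int) * cols) ((plaintext.toList.length : Int))) := by
  intro m
  induction m with
  | zero =>
    intro k hk
    have hkr : k = rows.toNat := by omega
    subst hkr
    rw [show PySem.List.pyRange ((rows.toNat : Nat) : Int) rows 1 = [] by
      rw [PySem.List.pyRange_one, show ((rows - ((rows.toNat : Nat) : Int)).toNat) = 0 by omega]
      simp]
    rw [List.foldl_nil]
  | succ m ih =>
    intro k hk
    have hklt : (k : Int) < rows := by omega
    have hkN : ((k : Int)).toNat = k := Int.toNat_natCast k
    have hlen : ((k : Int)).toNat < (bousGrid plaintext.toList cols rows.toNat k).length := by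
      rw [hkN, bousGrid_length]; omega
    have hrowblank : (bousGrid plaintext.toList cols rows.toNat k).getD ((k : Int)).toNat []
        = List.replicate cols.toNat none := by
      rw [hkN, bousGrid_getD _ _ _ _ _ (by omega)]
      simp
    have hstep : ∀ l : List (List (Option Char)),
        l.set ((k : Int)).toNat (bousRow plaintext.toList cols (k : Int))
          = l.set k (bousRow plaintext.toList cols (k : Int)) := by intro l; rw [hkN]
    rw [PySem.List.pyRange_one_cons hklt, List.foldl_cons]
    have hnext : ((k : Int) + 1) = (((k + 1 : Nat)) : Int) := by push_cast; ring
    have hmin : min ((k : Int) * cols + cols) ((plaintext.toList.length : Int))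
        = min (((k + 1 : Nat) : Int) * cols) ((plaintext.toList.length : Int)) := by
      push_cast; ring_nf
    by_cases hpar : (PySem.Int.mod (k : Int) 2 == 0) = true
    · rw [if_pos hpar]
      rw [fill_even plaintext cols (k : Int) hc (by positivity) hpar cols.toNat 0
        (bousGrid plaintext.toList cols rows.toNat k)
        (min ((k : Int) * cols) ((plaintext.toList.length : Int)))
        (by omega) (by omega) hlen (by rw [hrowblank]; simp) (by simp)]
      rw [hstep, bousGrid_set _ _ _ _ (by omega), hmin, hnext]
      exact ih (k + 1) (by omega)
    · rw [if_neg hpar]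
      have hpar' : (PySem.Int.mod (k : Int) 2 == 0) = false := by
        revert hpar; cases PySem.Int.mod (k : Int) 2 == 0 <;> simp
      rw [fill_odd plaintext cols (k : Int) hc (by positivity) hpar' cols.toNat (cols - 1)
        (bousGrid plaintext.toList cols rows.toNat k)
        (min ((k : Int) * cols) ((plaintext.toList.length : Int)))
        (by omega) (by omega) hlen
        (by rw [hrowblank, show cols.toNat = (bousRow plaintext.toList cols (k : Int)).length from (bousRow_length _ _ _).symm, List.drop_length, List.append_nil])
        (by rw [show cols - 1 - (cols - 1) = 0 by ring, add_zero])]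
      rw [hstep, bousGrid_set _ _ _ _ (by omega), hmin, hnext]
      exact ih (k + 1) (by omega)

-- ===== VERDICT (by name: the statement is the Claim_ definition above) =====
theorem route_boustrophedon_encrypt_spec : Claim_equal_route_boustrophedon_encrypt := by
  intro plaintext columns _ hpre
  unfold Spec_route_boustrophedon_encrypt
  have hc : (1 : Int) ≤ columns := hpre
  simp only [route_boustrophedon_encrypt, route_boustrophedon_encrypt_alt]
  rw [if_neg (show ¬columns < 1 by omega), if_neg (show ¬columns < 1 by omega),
    show PySem.Str.len plaintext = ((plaintext.toList.length : Nat) : Int) from rfl]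
  have h0 : 0 ≤ PySem.Int.floordiv ((plaintext.toList.length : Int) + columns - 1) columns := by
    have hlen0 : (0 : Int) ≤ (plaintext.toList.length : Int) := by positivity
    have := (PySem.Int.le_floordiv_iff_mul_le (q := 0)
      (a := (plaintext.toList.length : Int) + columns - 1) (b := columns) (by omega)).mpr (by omega)
    omega
  have hblank : (PySem.List.pyRange 0 columns 1).map (fun _ => (none : Option Char))
      = List.replicate columns.toNat none := by
    rw [PySem.List.pyRange_one, List.map_map,
      show ((fun (_ : Int) => (none : Option Char)) ∘ fun k : Nat => (0 : Int) + ↑k)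
        = (fun _ : Nat => (none : Option Char)) from rfl]
    simp [List.map_const']
  have hgrid0 : (PySem.List.pyRange 0
        (PySem.Int.floordiv ((plaintext.toList.length : Int) + columns - 1) columns) 1).map
        (fun _ => (PySem.List.pyRange 0 columns 1).map (fun _ => (none : Option Char)))
      = bousGrid plaintext.toList columns
        (PySem.Int.floordiv ((plaintext.toList.length : Int) + columns - 1) columns).toNat 0 := by
    rw [hblank, PySem.List.pyRange_one, List.map_map, bousGrid]
    apply List.ext_getElem
    · simp
    intro i h1 h2
    simp only [List.getElem_map, List.getElem_range, Function.comp]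
    rw [if_neg (Nat.not_lt_zero i)]
  have hfill := fill_all plaintext columns
    (PySem.Int.floordiv ((plaintext.toList.length : Int) + columns - 1) columns) hc h0
    (PySem.Int.floordiv ((plaintext.toList.length : Int) + columns - 1) columns).toNat 0 (by omega)
  rw [Nat.cast_zero, zero_mul,
    show min (0 : Int) ((plaintext.toList.length : Int)) = 0 by omega] at hfill
  rw [hgrid0, hfill]
  apply congrArg String.ofList
  apply PySem.List.foldl_congr_mem
  intro acc c hcmem
  apply PySem.List.foldl_congr_mem
  intro acc' r hrmem
  rw [PySem.List.mem_pyRange_one] at hcmem hrmem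
  obtain ⟨hc0, hclt⟩ := hcmem
  obtain ⟨hr0, hrlt⟩ := hrmem
  have hrn : r.toNat < (PySem.Int.floordiv ((plaintext.toList.length : Int) + columns - 1) columns).toNat := by
    omega
  have hgetr : ((bousGrid plaintext.toList columns
        (PySem.Int.floordiv ((plaintext.toList.length : Int) + columns - 1) columns).toNat
        (PySem.Int.floordiv ((plaintext.toList.length : Int) + columns - 1) columns).toNat).getD r.toNat [])
      = bousRow plaintext.toList columns r := by
    rw [bousGrid_getD _ _ _ _ _ hrn, if_pos hrn, Int.toNat_of_nonneg hr0]
  have hcbr : c.toNat < (bousRow plaintext.toList columns r).length := by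
    rw [bousRow_length]; omega
  have hgetc : (bousRow plaintext.toList columns r).getD c.toNat none
      = bousCell plaintext.toList columns r c := by
    rw [List.getD_eq_getElem _ none hcbr, bousRow_getElem _ _ _ _ (by omega),
      Int.toNat_of_nonneg hc0]
  rw [hgetr, hgetc,
    show r * columns + (if PySem.Int.mod r 2 == 0 then c else columns - 1 - c)
      = bousPos columns r c from rfl]
  have hpos0 : 0 ≤ bousPos columns r c := by
    have hm : 0 ≤ r * columns := mul_nonneg hr0 (by omega)
    rw [bousPos]; split_ifs <;> omega
  by_cases hlt : bousPos columns r c < ((plaintext.toList.length : Nat) : Int)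
  · rw [if_pos hlt,
      show PySem.Str.pyGet? plaintext (bousPos columns r c)
        = bousCell plaintext.toList columns r c from
        PySem.List.pyGet?_of_nonneg _ hpos0]
  · rw [if_neg hlt,
      show bousCell plaintext.toList columns r c = none from by
        rw [bousCell, List.getElem?_eq_none]; omega]
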